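-- pv_equiv track=rewrite | github.com/jarikmarwede/IdeaBag2-Solutions | Text/Pig_Latin/pig_latin.py | translate_to
-- ===== SOURCE A (Python) =====
-- def translate_to(string: str) -> str:
--     """Return pig latin version of string."""
--     vowels = ("a", "e", "i", "o", "u")
--     consonants = ("b", "c", "d", "f", "g",
--                   "h", "j", "k", "l", "m",
--                   "n", "p", "q", "r", "s",
--                   "t", "v", "w", "x", "z")
--     translated = ""
--
--     for word in string.split():
--         contains_letters = False
--         skip = False
--         beginning = ""
--
--         for character in word:
--             if skip is False:
--                 if character in consonants:
--                     contains_letters = True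
--                     beginning += character
--                 elif character in vowels:
--                     skip = True
--                     contains_letters = True
--                     translated += character
--                 else:
--                     translated += character
--             elif skip is True:
--                 translated += character
--         if contains_letters is True:
--             translated += beginning + "ay"
--         translated += " "
--     translated = translated.rstrip()
--     if translated == string:
--         raise ValueError(f"Nothing to translate in: {string}")
--     return translated
-- ===== SOURCE B (Python) =====
-- def _translate_word(word):
--     vowels = ("a", "e", "i", "o", "u")
--     consonants = ("b", "c", "d", "f", "g",
--                   "h", "j", "k", "l", "m",
--                   "n", "p", "q", "r", "s",
--                   "t", "v", "w", "x", "z")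
--     i = 0
--     while i < len(word) and word[i] not in vowels:
--         i += 1
--     prefix, rest = word[:i], word[i:]
--     cons = [c for c in prefix if c in consonants]
--     others = [c for c in prefix if c not in consonants]
--     if rest or cons:
--         return "".join(others) + rest + "".join(cons) + "ay"
--     return "".join(others)
--
--
-- def translate_to(string: str) -> str:
--     """Return pig latin version of string."""
--     translated = " ".join(_translate_word(word) for word in string.split())
--     if translated == string:
--         raise ValueError(f"Nothing to translate in: {string}")
--     return translated
-- ===== Notes on version B (the rewrite author's own statement) =====
-- stated objective: alternative
-- what changed: A translates each word with a stateful character loop (skip/contains_letters flags, a growing beginning buffer) accumulating everything into one big string and then rstripping a trailing space; B decomposes per word: split at the first vowel, partition the prefix into consonants and others, build the translated word directly, and join the finished words with a single str.join.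
import Mathlib
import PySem

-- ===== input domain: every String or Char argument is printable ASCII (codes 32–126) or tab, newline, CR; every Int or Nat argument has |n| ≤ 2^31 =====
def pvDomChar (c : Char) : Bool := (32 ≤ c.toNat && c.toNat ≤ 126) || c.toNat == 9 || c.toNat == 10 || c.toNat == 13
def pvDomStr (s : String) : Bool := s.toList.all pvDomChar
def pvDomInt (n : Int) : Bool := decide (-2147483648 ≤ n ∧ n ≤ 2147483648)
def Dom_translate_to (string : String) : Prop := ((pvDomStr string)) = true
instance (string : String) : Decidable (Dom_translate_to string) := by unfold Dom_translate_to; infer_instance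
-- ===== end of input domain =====

-- B replaces A's stateful per-character loop (skip/contains_letters flags, trailing-space + rstrip)
-- by a per-word decomposition (split at first vowel, partition prefix, ' '.join); same cost, plainer shape.

-- ===== PORT A =====
def pvVowel (c : Char) : Bool := ['a', 'e', 'i', 'o', 'u'].contains c
def pvCons (c : Char) : Bool :=
  ['b', 'c', 'd', 'f', 'g', 'h', 'j', 'k', 'l', 'm',
   'n', 'p', 'q', 'r', 's', 't', 'v', 'w', 'x', 'z'].contains c

-- the body of A's inner `for character in word` loop; state = (contains_letters, skip, beginning, translated)
def pvStepA (st : Bool × Bool × List Char × List Char) (c : Char) : Bool × Bool × List Char × List Char :=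
  let (contains_letters, skip, beginning, translated) := st
  if skip = false then
    if pvCons c then (true, skip, beginning ++ [c], translated)
    else if pvVowel c then (true, true, beginning, translated ++ [c])
    else (contains_letters, skip, beginning, translated ++ [c])
  else (contains_letters, skip, beginning, translated ++ [c])

-- the body of A's outer `for word in string.split()` loop
def pvWordA (translated : List Char) (word : List Char) : List Char :=
  let st := word.foldl pvStepA (false, false, [], translated)
  let translated := if st.1 then st.2.2.2 ++ st.2.2.1 ++ ['a', 'y'] else st.2.2.2
  translated ++ [' ']

def translate_to (string : String) : String :=
  let translated := (PySem.Chars.split₀ string.toList).foldl pvWordA []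
  let translated := PySem.Chars.rstrip translated
  -- A's final `if translated == string: raise ValueError(...)` raises exactly outside Pre_translate_to
  String.mk translated

-- ===== PORT B =====
-- Source B's _translate_word: the while loop is the takeWhile/dropWhile split at the first vowel
def pvWordB (word : List Char) : List Char :=
  let pre := word.takeWhile (fun c => !pvVowel c)
  let rest := word.dropWhile (fun c => !pvVowel c)
  let cons := pre.filter pvCons
  let others := pre.filter (fun c => !pvCons c)
  if !rest.isEmpty || !cons.isEmpty then others ++ rest ++ cons ++ ['a', 'y'] else others

def translate_to_alt (string : String) : String :=
  let translated :=
    PySem.Chars.join [' '] ((PySem.Chars.split₀ string.toList).map pvWordB)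
  -- Source B's final `if translated == string: raise ValueError(...)` raises exactly outside Pre_translate_to
  String.mk translated

-- ===== PRECONDITION & SPEC =====
-- independent letter test for the precondition (the 25 lowercase letters A recognises; 'y' is in neither tuple)
def pvLetter (c : Char) : Bool :=
  ['a', 'e', 'i', 'o', 'u', 'b', 'c', 'd', 'f', 'g', 'h', 'j', 'k', 'l', 'm',
   'n', 'p', 'q', 'r', 's', 't', 'v', 'w', 'x', 'z'].contains c

-- Pre_ excludes exactly the inputs on which A raises ValueError (its result equals the input):
-- strings with no recognised letter that are already whitespace-normalised.
def Pre_translate_to (string : String) : Prop :=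
  string.toList.any pvLetter = true ∨
  PySem.Chars.join [' '] (PySem.Chars.split₀ string.toList) ≠ string.toList
instance (string : String) : Decidable (Pre_translate_to string) := by
  unfold Pre_translate_to; infer_instance

def pvWitness_translate_to : String := "ab"

def Spec_translate_to (string : String) (out : String) : Prop := out = translate_to_alt string
instance (string : String) (out : String) : Decidable (Spec_translate_to string out) := by unfold Spec_translate_to; infer_instance

-- ===== CLAIM (what is proved, stated in full; the proofs are below) =====
def Claim_equal_translate_to : Prop := ∀ (string : String), Dom_translate_to string → Pre_translate_to string → Spec_translate_to string (translate_to string)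

-- ===== LEMMAS AND PROOFS =====

theorem pvVowel_of_cons {c : Char} (h : pvCons c = true) : pvVowel c = false := by
  simp only [pvCons, List.contains_eq_mem, decide_eq_true_eq, List.mem_cons,
    List.not_mem_nil, or_false] at h
  rcases h with rfl | rfl | rfl | rfl | rfl | rfl | rfl | rfl | rfl | rfl | rfl | rfl | rfl
    | rfl | rfl | rfl | rfl | rfl | rfl | rfl <;> rfl

-- A's inner loop after the first vowel: every remaining character is appended to `translated`
theorem foldA_true (cs : List Char) : ∀ (cl : Bool) (beg tr : List Char),
    cs.foldl pvStepA (cl, true, beg, tr) = (cl, true, beg, tr ++ cs) := by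
  induction cs with
  | nil => intro cl beg tr; simp
  | cons c cs ih =>
      intro cl beg tr
      simp only [List.foldl_cons, pvStepA]
      simp [ih]

-- A's inner loop before the first vowel, fully characterised
theorem foldA_false (cs : List Char) : ∀ (cl : Bool) (beg tr : List Char),
    cs.foldl pvStepA (cl, false, beg, tr) =
      (cl || (cs.takeWhile (fun c => !pvVowel c)).any pvCons || cs.any pvVowel,
       cs.any pvVowel,
       beg ++ (cs.takeWhile (fun c => !pvVowel c)).filter pvCons,
       tr ++ (cs.takeWhile (fun c => !pvVowel c)).filter (fun c => !pvCons c)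
          ++ cs.dropWhile (fun c => !pvVowel c)) := by
  induction cs with
  | nil => intro cl beg tr; simp
  | cons c cs ih =>
      intro cl beg tr
      by_cases hc : pvCons c = true
      · have hv : pvVowel c = false := pvVowel_of_cons hc
        rw [List.foldl_cons,
          show pvStepA (cl, false, beg, tr) c = (true, false, beg ++ [c], tr) from by
            simp [pvStepA, hc], ih]
        simp [hv, hc, List.filter_cons, List.takeWhile_cons, List.dropWhile_cons]
      · by_cases hv : pvVowel c = true
        · rw [List.foldl_cons,
            show pvStepA (cl, false, beg, tr) c = (true, true, beg, tr ++ [c]) from by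
              simp [pvStepA, hc, hv], foldA_true]
          simp [hv, List.takeWhile_cons, List.dropWhile_cons]
        · rw [List.foldl_cons,
            show pvStepA (cl, false, beg, tr) c = (cl, false, beg, tr ++ [c]) from by
              simp [pvStepA, hc, hv], ih]
          simp [hv, hc, List.filter_cons, List.takeWhile_cons, List.dropWhile_cons]

-- one word: A's loop body equals B's word translation (plus A's trailing space)
theorem wordA_eq (tr w : List Char) : pvWordA tr w = tr ++ pvWordB w ++ [' '] := by
  simp only [pvWordA, pvWordB]
  rw [foldA_false]
  simp only [Bool.false_or]
  have h1 : ((w.takeWhile (fun c => !pvVowel c)).any pvCons)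
      = !((w.takeWhile (fun c => !pvVowel c)).filter pvCons).isEmpty := by
    by_cases h : (w.takeWhile (fun c => !pvVowel c)).any pvCons = true
    · rw [h]
      obtain ⟨c, hc, hpc⟩ := List.any_eq_true.mp h
      have hmem : c ∈ (w.takeWhile (fun c => !pvVowel c)).filter pvCons :=
        List.mem_filter.mpr ⟨hc, hpc⟩
      rcases hfil : (w.takeWhile (fun c => !pvVowel c)).filter pvCons with _ | _
      · rw [hfil] at hmem; simp at hmem
      · rfl
    · rw [Bool.not_eq_true] at h
      rw [h]
      have hfil : (w.takeWhile (fun c => !pvVowel c)).filter pvCons = [] :=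
        List.filter_eq_nil_iff.mpr (fun c hc => by
          have := List.any_eq_false.mp h c hc; simp [this])
      simp [hfil]
  have h2 : (w.any pvVowel) = !(w.dropWhile (fun c => !pvVowel c)).isEmpty := by
    by_cases h : w.any pvVowel = true
    · rw [h]
      obtain ⟨c, hc, hpc⟩ := List.any_eq_true.mp h
      rcases hdw : w.dropWhile (fun c => !pvVowel c) with _ | _
      · have := List.dropWhile_eq_nil_iff.mp hdw c hc
        rw [hpc] at this
        simp at this
      · rfl
    · rw [Bool.not_eq_true] at h
      rw [h]
      have hdw : w.dropWhile (fun c => !pvVowel c) = [] :=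
        List.dropWhile_eq_nil_iff.mpr (fun c hc => by
          have := List.any_eq_false.mp h c hc; simp [this])
      simp [hdw]
  rw [h1, h2]
  rcases hA : ((w.takeWhile (fun c => !pvVowel c)).filter pvCons).isEmpty
    <;> rcases hB : ((w.dropWhile (fun c => !pvVowel c))).isEmpty
    <;> simp only [hA, hB, Bool.not_false, Bool.not_true, Bool.false_or, Bool.or_false,
          Bool.true_or, Bool.or_true, if_true, if_false, List.nil_append, List.append_assoc,
          Bool.false_eq_true]
  all_goals first
    | rfl
    | (rw [List.isEmpty_iff.mp hB]; simp)

-- A's outer loop unrolled into a flat concatenation of B's word translations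
theorem foldWords (ws : List (List Char)) : ∀ acc : List Char,
    ws.foldl pvWordA acc = acc ++ (ws.map (fun w => pvWordB w ++ [' '])).flatten := by
  induction ws with
  | nil => intro acc; simp
  | cons w ws ih =>
      intro acc
      simp only [List.foldl_cons, List.map_cons, List.flatten_cons, ih, wordA_eq]
      simp [List.append_assoc]

-- rstrip leaves a block ending in a nonempty whitespace-free chunk alone
theorem rstrip_append (x w : List Char) (hw : w ≠ [])
    (h : ∀ c ∈ w, PySem.Chars.isspace c = false) :
    PySem.Chars.rstrip (x ++ w) = x ++ w := by
  unfold PySem.Chars.rstrip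
  rcases hrev : w.reverse with _ | ⟨c, t⟩
  · exact absurd (by simpa using congrArg List.reverse hrev) hw
  · have hc : PySem.Chars.isspace c = false := by
      apply h
      have hcmem : c ∈ w.reverse := by rw [hrev]; exact List.mem_cons_self ..
      simpa using hcmem
    have hxw : (x ++ w).reverse = c :: (t ++ x.reverse) := by
      rw [List.reverse_append, hrev]; rfl
    rw [hxw, List.dropWhile_cons, hc]
    simp only [Bool.false_eq_true, if_false]
    rw [show c :: (t ++ x.reverse) = (c :: t) ++ x.reverse from rfl, List.reverse_append,
      List.reverse_reverse, ← hrev, List.reverse_reverse]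

theorem isspace_space : PySem.Chars.isspace ' ' = true := by decide

theorem rstrip_space (x : List Char) :
    PySem.Chars.rstrip (x ++ [' ']) = PySem.Chars.rstrip x := by
  unfold PySem.Chars.rstrip
  rw [List.reverse_append]
  simp [List.dropWhile_cons, isspace_space]

-- join with a single space, appending one word at the back
theorem join_concat (ws : List (List Char)) (w : List Char) (hne : ws ≠ []) :
    PySem.Chars.join [' '] (ws ++ [w]) = PySem.Chars.join [' '] ws ++ [' '] ++ w := by
  induction ws with
  | nil => exact absurd rfl hne
  | cons x ws ih =>
      rcases ws with _ | ⟨y, t⟩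
      · simp [PySem.Chars.join, List.intercalate]
      · have hih := ih (by simp)
        rw [List.cons_append] at hih
        rw [show (x :: y :: t) ++ [w] = x :: (y :: (t ++ [w])) from rfl,
          PySem.Chars.join_cons_cons, hih, PySem.Chars.join_cons_cons]
        simp [List.append_assoc]

-- the flat space-terminated concatenation equals join-with-space plus one trailing space
theorem flat_eq_join (ws : List (List Char)) (hne : ws ≠ []) :
    (ws.map (fun w => w ++ [' '])).flatten = PySem.Chars.join [' '] ws ++ [' '] := by
  induction ws with
  | nil => exact absurd rfl hne
  | cons w ws ih =>
      rcases ws with _ | ⟨y, t⟩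
      · simp [PySem.Chars.join, List.intercalate]
      · rw [List.map_cons, List.flatten_cons, ih (by simp), PySem.Chars.join_cons_cons]
        simp [List.append_assoc]

-- a word is "good" when it is nonempty and contains no whitespace
def pvGood (w : List Char) : Prop := w ≠ [] ∧ ∀ c ∈ w, PySem.Chars.isspace c = false

-- main spacing lemma: rstrip of the flat concatenation is the single-space join
theorem rstrip_flat (ws : List (List Char)) (h : ∀ w ∈ ws, pvGood w) :
    PySem.Chars.rstrip ((ws.map (fun w => w ++ [' '])).flatten)
      = PySem.Chars.join [' '] ws := by
  rcases List.eq_nil_or_concat ws with rfl | ⟨ws', w, rfl⟩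
  · simp [PySem.Chars.rstrip, PySem.Chars.join, List.intercalate]
  · rw [List.concat_eq_append] at h ⊢
    obtain ⟨hw1, hw2⟩ := h w (by simp)
    rcases eq_or_ne ws' [] with rfl | hne
    · have h0 := rstrip_append [] w hw1 hw2
      rw [List.nil_append] at h0
      rw [List.nil_append, List.map_cons, List.map_nil, List.flatten_cons, List.flatten_nil,
        List.append_nil, rstrip_space, h0]
      simp [PySem.Chars.join, List.intercalate]
    · rw [flat_eq_join _ (by simp), rstrip_space, join_concat _ _ hne,
        rstrip_append _ w hw1 hw2]

-- every word of split₀ is good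
theorem split₀_go_good (cs : List Char) : ∀ (cur : List Char) (acc : List (List Char)),
    (∀ c ∈ cur, PySem.Chars.isspace c = false) →
    (∀ w ∈ acc, pvGood w) →
    ∀ w ∈ PySem.Chars.split₀.go cs cur acc, pvGood w := by
  induction cs with
  | nil =>
      intro cur acc hcur hacc w hw
      rcases h : cur.isEmpty
      · simp only [PySem.Chars.split₀.go, h, Bool.false_eq_true, if_false] at hw
        rw [List.mem_reverse] at hw
        rcases List.mem_cons.mp hw with hw | hw
        · subst hw
          refine ⟨by simpa [List.isEmpty_iff] using h, ?_⟩
          intro c hc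
          exact hcur c (by simpa using hc)
        · exact hacc w hw
      · simp only [PySem.Chars.split₀.go, h, if_true] at hw
        exact hacc w (by simpa using hw)
  | cons c cs ih =>
      intro cur acc hcur hacc w hw
      by_cases hsp : PySem.Chars.isspace c = true
      · rcases h : cur.isEmpty
        · simp only [PySem.Chars.split₀.go, hsp, h, Bool.false_eq_true, if_false, if_true] at hw
          refine ih [] _ (by simp) ?_ w hw
          intro v hv
          rcases List.mem_cons.mp hv with hv | hv
          · subst hv
            refine ⟨by simpa [List.isEmpty_iff] using h, ?_⟩
            intro d hd
            exact hcur d (by simpa using hd)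
          · exact hacc v hv
        · simp only [PySem.Chars.split₀.go, hsp, h, if_true] at hw
          exact ih [] acc (by simp) hacc w hw
      · simp only [PySem.Chars.split₀.go, hsp, Bool.false_eq_true, if_false] at hw
        refine ih (c :: cur) acc ?_ hacc w hw
        intro d hd
        rcases List.mem_cons.mp hd with hd | hd
        · subst hd; simpa using hsp
        · exact hcur d hd

theorem split₀_good (s : List Char) : ∀ w ∈ PySem.Chars.split₀ s, pvGood w := by
  intro w hw
  exact split₀_go_good s [] [] (by simp) (by simp) w hw

-- B's word translation preserves goodness
theorem wordB_good (w : List Char) (h : pvGood w) : pvGood (pvWordB w) := by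
  obtain ⟨h1, h2⟩ := h
  have hsub : ∀ c ∈ pvWordB w, c ∈ w ∨ c = 'a' ∨ c = 'y' := by
    intro c hc
    simp only [pvWordB] at hc
    split at hc
    · simp only [List.mem_append, List.mem_cons, List.not_mem_nil, or_false] at hc
      rcases hc with ((hc | hc) | hc) | (hc | hc)
      · exact Or.inl ((List.takeWhile_sublist _).subset (List.mem_of_mem_filter hc))
      · exact Or.inl ((List.dropWhile_sublist _).subset hc)
      · exact Or.inl ((List.takeWhile_sublist _).subset (List.mem_of_mem_filter hc))
      · exact Or.inr (Or.inl hc)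
      · exact Or.inr (Or.inr hc)
    · exact Or.inl ((List.takeWhile_sublist _).subset (List.mem_of_mem_filter hc))
  constructor
  · simp only [pvWordB]
    rcases hr : (w.dropWhile (fun c => !pvVowel c)).isEmpty
    · simp [hr]
    · rcases hco : (List.filter pvCons (w.takeWhile (fun c => !pvVowel c))).isEmpty
      · simp [hr, hco]
      · simp only [hr, hco, Bool.not_true, Bool.or_false, Bool.false_eq_true, if_false]
        have htake : w.takeWhile (fun c => !pvVowel c) = w := by
          have hsplit := List.takeWhile_append_dropWhile (p := fun c => !pvVowel c) (l := w)
          rw [List.isEmpty_iff.mp hr] at hsplit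
          simpa using hsplit
        have hall : (w.takeWhile (fun c => !pvVowel c)).filter (fun c => !pvCons c)
            = w.takeWhile (fun c => !pvVowel c) := by
          rw [List.filter_eq_self]
          intro c hc
          have := List.filter_eq_nil_iff.mp (List.isEmpty_iff.mp hco) c hc
          simpa using this
        rw [hall, htake]
        exact h1
  · intro c hc
    rcases hsub c hc with hc | rfl | rfl
    · exact h2 c hc
    · decide
    · decide

-- ===== VERDICT (by name: the statement is the Claim_ definition above) =====
theorem translate_to_spec : Claim_equal_translate_to := by
  intro s _ _
  show translate_to s = translate_to_alt s
  simp only [translate_to, translate_to_alt]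
  rw [foldWords, List.nil_append]
  have hmap : ((PySem.Chars.split₀ s.toList).map pvWordB).map (fun w => w ++ [' '])
      = (PySem.Chars.split₀ s.toList).map (fun w => pvWordB w ++ [' ']) := by
    simp [List.map_map, Function.comp]
  rw [← hmap, rstrip_flat]
  intro w hw
  simp only [List.mem_map] at hw
  obtain ⟨v, hv, rfl⟩ := hw
  exact wordB_good v (split₀_good s.toList v hv)
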